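-- pv_equiv track=rewrite | github.com/LaimeJesus/PCA | PCA.py | NextClosure
-- ===== SOURCE A (Python) =====
-- import copy
--
-- def Intent(S,context):
--     R = set([])
--     for a in range(context[2]):
--         add = True
--         for o in S:
--             if [o,a] not in context[0]:
--                 add = False
--         if add:
--             R.add(a)
--     return R
--
-- def Extent(S,context):
--     R = set([])
--     for o in range(context[1]):
--         add = True
--         for a in S:
--             if [o,a] not in context[0]:
--                 add = False
--         if add:
--             R.add(o)
--     return R
--
-- def oplus(A, a, context):
--     B = copy.deepcopy(A)
--     for x in A:
--         if x > a:
--             B.remove(x)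
--     B.add(a)
--     B = Extent(Intent(set(B), context), context)
--     return B
--
-- def Next(A, context):
--     for i in reversed(range(context[1])):
--         if not i in A:
--             B = oplus(A, i, context)
--             fin = True
--             for j in B:
--                 if j < i and j not in A:
--                     fin = False
--             if fin:
--                 return B
--
-- def NextClosure(context):
--     Concepts = []
--     A = Extent(Intent(set([]),context),context)
--     while len(A) < context[1]:
--         Concepts.append([A, Intent(A, context)])
--         A = Next(A, context)
--     Concepts.append([A, Intent(A, context)])
--     return Concepts
-- ===== SOURCE B (Python) =====
-- def Intent(S, context):
--     R = set([])
--     for a in range(context[2]):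
--         add = True
--         for o in S:
--             if [o, a] not in context[0]:
--                 add = False
--         if add:
--             R.add(a)
--     return R
--
-- def NextClosure(context):
--     rel, n, m = context[0], context[1], context[2]
--     objs = range(max(n, 0))
--     # extent of each single attribute; every closed extent is an intersection of these
--     attr_ext = [frozenset(o for o in objs if [o, a] in rel) for a in range(max(m, 0))]
--     closed = {frozenset(objs)}
--     for E in attr_ext:
--         closed |= {X & E for X in closed}
--     # lectic order used by NextClosure: smaller object indices are more significant
--     def key(A):
--         return tuple(o in A for o in objs)
--     return [[set(A), Intent(set(A), context)] for A in sorted(closed, key=key)]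
-- ===== Notes on version B (the rewrite author's own statement) =====
-- stated objective: alternative
-- what changed: Instead of walking from closure(empty) to the full extent via NextClosure's lectic-successor search (oplus/Next), B generates every closed extent at once by closing the family of single-attribute extents under pairwise intersection, then sorts them by the lectic key that the successor walk follows and attaches each intent.
import Mathlib
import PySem

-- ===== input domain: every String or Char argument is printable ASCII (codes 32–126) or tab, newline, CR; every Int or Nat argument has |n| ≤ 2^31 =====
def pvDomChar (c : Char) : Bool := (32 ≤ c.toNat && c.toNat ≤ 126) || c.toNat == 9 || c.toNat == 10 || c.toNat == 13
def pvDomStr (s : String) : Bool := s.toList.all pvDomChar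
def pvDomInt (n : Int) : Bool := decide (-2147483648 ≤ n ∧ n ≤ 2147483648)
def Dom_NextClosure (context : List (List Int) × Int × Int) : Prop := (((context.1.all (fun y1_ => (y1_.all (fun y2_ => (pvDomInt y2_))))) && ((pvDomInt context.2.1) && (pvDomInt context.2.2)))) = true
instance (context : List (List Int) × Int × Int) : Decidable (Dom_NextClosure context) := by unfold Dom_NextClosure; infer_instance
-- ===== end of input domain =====

-- B replaces the NextClosure lectic-successor walk by closing the attribute-extent family
-- under intersection and sorting the closed extents by the same lectic key (objective: alternative).

-- ===== PORT A =====
def pyIntent (S : List Int) (ctx : List (List Int) × Int × Int) : List Int :=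
  (PySem.List.pyRange 0 ctx.2.2 1).foldl
    (fun R a =>
      let add := S.foldl (fun add o => if [o, a] ∈ ctx.1 then add else false) true
      if add then PySem.Set.add R a else R) []

def pyExtent (S : List Int) (ctx : List (List Int) × Int × Int) : List Int :=
  (PySem.List.pyRange 0 ctx.2.1 1).foldl
    (fun R o =>
      let add := S.foldl (fun add a => if [o, a] ∈ ctx.1 then add else false) true
      if add then PySem.Set.add R o else R) []

-- B.remove(x): x was copied from A into B and removed at most once, so the KeyError
-- branch of set.remove is unreachable; Set.discard is exact here.
def pyOplus (A : List Int) (a : Int) (ctx : List (List Int) × Int × Int) : List Int :=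
  let B := A.foldl (fun B x => if x > a then PySem.Set.discard B x else B) A
  let B := PySem.Set.add B a
  pyExtent (pyIntent (PySem.Set.ofList B) ctx) ctx

def pyNextGo (A : List Int) (ctx : List (List Int) × Int × Int) : List Int → Option (List Int)
  | [] => none
  | i :: rest =>
    if i ∈ A then pyNextGo A ctx rest
    else
      let B := pyOplus A i ctx
      let fin := B.foldl (fun fin j => if j < i ∧ j ∉ A then false else fin) true
      if fin then some B else pyNextGo A ctx rest

def pyNext (A : List Int) (ctx : List (List Int) × Int × Int) : Option (List Int) :=
  pyNextGo A ctx (PySem.List.pyRange 0 ctx.2.1 1).reverse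

-- the while loop; fuel 2^n + 1 suffices because the lectic value of A strictly
-- increases on every iteration (proved below); both fuel-exhaustion and a None
-- from Next (on which Python would raise TypeError) are unreachable.
def pyNCLoop (ctx : List (List Int) × Int × Int) : Nat → List Int → List (List (List Int)) → List (List (List Int))
  | 0, _, acc => acc
  | fuel + 1, A, acc =>
    if (A.length : Int) < ctx.2.1 then
      match pyNext A ctx with
      | some A' => pyNCLoop ctx fuel A' (acc ++ [[A, pyIntent A ctx]])
      | none => acc
    else acc ++ [[A, pyIntent A ctx]]

def NextClosure (context : List (List Int) × Int × Int) : List (List (List Int)) :=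
  pyNCLoop context (2 ^ context.2.1.toNat + 1) (pyExtent (pyIntent [] context) context) []

-- ===== PORT B =====
def NextClosure_alt (context : List (List Int) × Int × Int) : List (List (List Int)) :=
  let rel := context.1
  let n := context.2.1
  let objs := PySem.List.pyRange 0 (max n 0) 1
  let attrExt := (PySem.List.pyRange 0 (max context.2.2 0) 1).map
    (fun a => objs.filter (fun o => decide ([o, a] ∈ rel)))
  let closed := attrExt.foldl
    (fun closed E => PySem.Set.union closed (closed.map (fun X => X.filter (fun o => decide (o ∈ E)))))
    (PySem.Set.ofList [objs])
  -- lectic key: the membership tuple of X over objs (tuple(o in A for o in objs))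
  let key := fun (X : List Int) => objs.map (fun o => decide (o ∈ X))
  (PySem.List.sorted closed key false).map (fun X => [X, pyIntent X context])

-- ===== PRECONDITION & SPEC =====
def Spec_NextClosure (context : List (List Int) × Int × Int) (out : List (List (List Int))) : Prop := out = NextClosure_alt context
instance (context : List (List Int) × Int × Int) (out : List (List (List Int))) : Decidable (Spec_NextClosure context out) := by unfold Spec_NextClosure; infer_instance

-- ===== CLAIM (what is proved, stated in full; the proofs are below) =====
def Claim_equal_NextClosure : Prop := ∀ (context : List (List Int) × Int × Int), Dom_NextClosure context → Spec_NextClosure context (NextClosure context)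

-- ===== LEMMAS AND PROOFS =====

-- ---- abbreviations for the task's derivation operators (filter form) ----
def pvExt (ctx : List (List Int) × Int × Int) (T : List Int) : List Int :=
  (PySem.List.pyRange 0 ctx.2.1 1).filter (fun o => T.all (fun a => decide ([o, a] ∈ ctx.1)))

def pvItt (ctx : List (List Int) × Int × Int) (S : List Int) : List Int :=
  (PySem.List.pyRange 0 ctx.2.2 1).filter (fun a => S.all (fun o => decide ([o, a] ∈ ctx.1)))

def pvCl (ctx : List (List Int) × Int × Int) (S : List Int) : List Int := pvExt ctx (pvItt ctx S)

def pvFull (ctx : List (List Int) × Int × Int) : List Int := PySem.List.pyRange 0 ctx.2.1 1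

def pvClosed (ctx : List (List Int) × Int × Int) (X : List Int) : Prop := pvCl ctx X = X

-- lectic key: nkey n X = sum over o ∈ X of 2^(n-1-o)
def pvEkey (n o : Int) : Nat := 2 ^ ((n - 1 - o).toNat)
def pvNkey (n : Int) (X : List Int) : Nat := (X.map (pvEkey n)).sum

def pvInRange (n : Int) (X : List Int) : Prop := ∀ o ∈ X, 0 ≤ o ∧ o < n

-- the closed-set list computed by B
def pvColExt (ctx : List (List Int) × Int × Int) (a : Int) : List Int :=
  (PySem.List.pyRange 0 (max ctx.2.1 0) 1).filter (fun o => decide ([o, a] ∈ ctx.1))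

def pvClosedL (ctx : List (List Int) × Int × Int) : List (List Int) :=
  ((PySem.List.pyRange 0 (max ctx.2.2 0) 1).map (pvColExt ctx)).foldl
    (fun closed E => PySem.Set.union closed (closed.map (fun X => X.filter (fun o => decide (o ∈ E)))))
    (PySem.Set.ofList [PySem.List.pyRange 0 (max ctx.2.1 0) 1])

def pvKeyT (n : Int) (X : List Int) : List Bool :=
  (PySem.List.pyRange 0 (max n 0) 1).map (fun o => decide (o ∈ X))

-- the list of extents visited by A's while loop
def pvChain (ctx : List (List Int) × Int × Int) : Nat → List Int → List (List Int)
  | 0, _ => []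
  | fuel + 1, A =>
    if (A.length : Int) < ctx.2.1 then
      match pyNext A ctx with
      | some A' => A :: pvChain ctx fuel A'
      | none => []
    else [A]

-- ---- basic fold/flag lemmas ----
lemma pv_flag_foldl (S : List Int) (p : Int → Bool) (b : Bool) :
    S.foldl (fun add o => if p o then add else false) b = (b && S.all p) := by
  induction S generalizing b with
  | nil => simp
  | cons o S ih =>
    rw [List.foldl_cons]
    by_cases h : p o = true
    · rw [if_pos h, ih, List.all_cons, h]
      simp
    · rw [if_neg h, ih, List.all_cons]
      simp [h]


lemma pv_foldl_add_filter (l : List Int) (p : Int → Bool) (acc : List Int)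
    (hnd : l.Nodup) (h : ∀ a ∈ l, a ∉ acc) :
    l.foldl (fun R a => if p a then PySem.Set.add R a else R) acc = acc ++ l.filter p := by
  induction l generalizing acc with
  | nil => simp
  | cons a l ih =>
    simp only [List.nodup_cons] at hnd
    have ha : a ∉ acc := h a (by simp)
    by_cases hp : p a
    · rw [List.foldl_cons, if_pos hp, PySem.Set.add_of_not_mem ha,
        ih (acc ++ [a]) hnd.2 (by
          intro b hb
          simp only [List.mem_append, List.mem_singleton]
          rintro (hb' | rfl)
          · exact h b (by simp [hb]) hb'
          · exact hnd.1 hb)]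
      simp [hp]
    · rw [List.foldl_cons, if_neg hp, ih acc hnd.2 (fun b hb => h b (by simp [hb]))]
      simp [hp]


lemma pyIntent_eq (S : List Int) (ctx : List (List Int) × Int × Int) :
    pyIntent S ctx = pvItt ctx S := by
  unfold pyIntent pvItt
  have h : ∀ a : Int, (S.foldl (fun add o => if [o, a] ∈ ctx.1 then add else false) true)
      = S.all (fun o => decide ([o, a] ∈ ctx.1)) := by
    intro a
    rw [show (fun add o => if [o, a] ∈ ctx.1 then add else false)
        = (fun add o => if (fun o => decide ([o, a] ∈ ctx.1)) o then add else false) by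
      funext add o; by_cases h : [o, a] ∈ ctx.1 <;> simp [h]]
    rw [pv_flag_foldl]
    simp
  simp only [h]
  rw [pv_foldl_add_filter _ _ _ (PySem.List.nodup_pyRange_one _ _) (by simp)]
  simp


lemma pyExtent_eq (S : List Int) (ctx : List (List Int) × Int × Int) :
    pyExtent S ctx = pvExt ctx S := by
  unfold pyExtent pvExt
  have h : ∀ o : Int, (S.foldl (fun add a => if [o, a] ∈ ctx.1 then add else false) true)
      = S.all (fun a => decide ([o, a] ∈ ctx.1)) := by
    intro o
    rw [show (fun add a => if [o, a] ∈ ctx.1 then add else false)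
        = (fun add a => if (fun a => decide ([o, a] ∈ ctx.1)) a then add else false) by
      funext add a; by_cases h : [o, a] ∈ ctx.1 <;> simp [h]]
    rw [pv_flag_foldl]
    simp
  simp only [h]
  rw [pv_foldl_add_filter _ _ _ (PySem.List.nodup_pyRange_one _ _) (by simp)]
  simp


-- ---- membership / canonicity ----
lemma mem_pvExt (ctx : List (List Int) × Int × Int) (T : List Int) (o : Int) :
    o ∈ pvExt ctx T ↔ (0 ≤ o ∧ o < ctx.2.1) ∧ ∀ a ∈ T, [o, a] ∈ ctx.1 := by
  unfold pvExt
  simp [List.mem_filter, PySem.List.mem_pyRange_one, and_comm]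


lemma mem_pvItt (ctx : List (List Int) × Int × Int) (S : List Int) (a : Int) :
    a ∈ pvItt ctx S ↔ (0 ≤ a ∧ a < ctx.2.2) ∧ ∀ o ∈ S, [o, a] ∈ ctx.1 := by
  unfold pvItt
  simp [List.mem_filter, PySem.List.mem_pyRange_one, and_comm]


lemma canon_pvExt (ctx : List (List Int) × Int × Int) (T : List Int) :
    (pvExt ctx T).Pairwise (· < ·) := by
  exact List.Pairwise.filter _ (PySem.List.pairwise_lt_pyRange_one _ _)


lemma pv_nodup_of_canon {X : List Int} (hX : X.Pairwise (· < ·)) : X.Nodup := by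
  exact hX.imp (fun h => ne_of_lt h)

lemma pv_canon_ext (X Y : List Int) (hX : X.Pairwise (· < ·)) (hY : Y.Pairwise (· < ·))
    (h : ∀ z : Int, z ∈ X ↔ z ∈ Y) : X = Y := by
  have hp : X.Perm Y := (List.perm_ext_iff_of_nodup (pv_nodup_of_canon hX) (pv_nodup_of_canon hY)).2 h
  exact hp.eq_of_pairwise (fun a b _ _ h1 h2 => absurd h2 (not_lt.2 h1.le)) hX hY



-- ---- Galois / closure facts ----
lemma pvItt_congr (ctx : List (List Int) × Int × Int) {S S' : List Int}
    (h : ∀ x : Int, x ∈ S ↔ x ∈ S') : pvItt ctx S = pvItt ctx S' := by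
  unfold pvItt
  congr 1
  funext a
  rw [Bool.eq_iff_iff]
  simp only [List.all_eq_true, decide_eq_true_eq]
  constructor
  · intro hS o ho; exact hS o ((h o).2 ho)
  · intro hS o ho; exact hS o ((h o).1 ho)

lemma pvExt_anti (ctx : List (List Int) × Int × Int) {T T' : List Int}
    (h : ∀ a ∈ T, a ∈ T') : ∀ o ∈ pvExt ctx T', o ∈ pvExt ctx T := by
  intro o ho
  rw [mem_pvExt] at *
  exact ⟨ho.1, fun a ha => ho.2 a (h a ha)⟩


lemma pvItt_anti (ctx : List (List Int) × Int × Int) {S S' : List Int}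
    (h : ∀ o ∈ S, o ∈ S') : ∀ a ∈ pvItt ctx S', a ∈ pvItt ctx S := by
  intro a ha
  rw [mem_pvItt] at *
  exact ⟨ha.1, fun o ho => ha.2 o (h o ho)⟩


lemma pv_subset_cl (ctx : List (List Int) × Int × Int) (S : List Int)
    (h : pvInRange ctx.2.1 S) : ∀ o ∈ S, o ∈ pvCl ctx S := by
  intro o ho
  rw [pvCl, mem_pvExt]
  refine ⟨h o ho, fun a ha => ?_⟩
  rw [mem_pvItt] at ha
  exact ha.2 o ho


lemma pvCl_mono (ctx : List (List Int) × Int × Int) {S S' : List Int}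
    (h : ∀ o ∈ S, o ∈ S') : ∀ o ∈ pvCl ctx S, o ∈ pvCl ctx S' := by
  exact pvExt_anti ctx (pvItt_anti ctx h)


lemma pvClosed_cl (ctx : List (List Int) × Int × Int) (S : List Int) :
    pvClosed ctx (pvCl ctx S) := by
  unfold pvClosed
  apply pv_canon_ext _ _ (canon_pvExt _ _) (canon_pvExt _ _)
  intro z
  constructor
  · intro hz
    -- pvItt S ⊆ pvItt (pvCl S), so pvCl (pvCl S) ⊆ pvCl S
    refine pvExt_anti ctx (T := pvItt ctx S) ?_ z hz
    intro a ha
    rw [mem_pvItt] at ha ⊢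
    refine ⟨ha.1, fun o ho => ?_⟩
    rw [pvCl, mem_pvExt] at ho
    exact ho.2 a (by rw [mem_pvItt]; exact ha)
  · intro hz
    refine pv_subset_cl ctx _ ?_ z hz
    intro o ho
    rw [pvCl, mem_pvExt] at ho
    exact ho.1


lemma pv_inRange_of_closed (ctx : List (List Int) × Int × Int) {X : List Int}
    (h : pvClosed ctx X) : pvInRange ctx.2.1 X := by
  intro o ho
  rw [← h, pvCl, mem_pvExt] at ho
  exact ho.1


lemma pv_canon_of_closed (ctx : List (List Int) × Int × Int) {X : List Int}
    (h : pvClosed ctx X) : X.Pairwise (· < ·) := by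
  rw [← h]
  exact canon_pvExt _ _



lemma pvClosed_ext (ctx : List (List Int) × Int × Int) (T : List Int)
    (h : ∀ a ∈ T, 0 ≤ a ∧ a < ctx.2.2) : pvClosed ctx (pvExt ctx T) := by
  unfold pvClosed
  apply pv_canon_ext _ _ (canon_pvExt _ _) (canon_pvExt _ _)
  intro z
  constructor
  · intro hz
    -- T ⊆ pvItt (pvExt T) hence pvCl (pvExt T) ⊆ pvExt T
    refine pvExt_anti ctx (T := T) ?_ z hz
    intro a ha
    rw [mem_pvItt]
    refine ⟨h a ha, fun o ho => ?_⟩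
    rw [mem_pvExt] at ho
    exact ho.2 a ha
  · intro hz
    refine pv_subset_cl ctx _ ?_ z hz
    intro o ho
    rw [mem_pvExt] at ho
    exact ho.1


lemma pvClosed_full (ctx : List (List Int) × Int × Int) : pvClosed ctx (pvFull ctx) := by
  have : pvFull ctx = pvExt ctx [] := by
    unfold pvFull pvExt
    simp
  rw [this]
  exact pvClosed_ext ctx [] (by simp)

lemma pvClosed_inter (ctx : List (List Int) × Int × Int) {X Y : List Int}
    (hX : pvClosed ctx X) (hY : pvClosed ctx Y) :
    pvClosed ctx (X.filter (fun o => decide (o ∈ Y))) := by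
  unfold pvClosed
  apply pv_canon_ext _ _ (canon_pvExt _ _)
    (List.Pairwise.filter _ (pv_canon_of_closed ctx hX))
  intro z
  simp only [List.mem_filter, decide_eq_true_eq]
  constructor
  · intro hz
    have hzX : z ∈ X := by
      rw [← hX]
      refine pvCl_mono ctx (S := X.filter (fun o => decide (o ∈ Y))) ?_ z hz
      intro o ho
      exact (List.mem_filter.1 ho).1
    have hzY : z ∈ Y := by
      rw [← hY]
      refine pvCl_mono ctx (S := X.filter (fun o => decide (o ∈ Y))) ?_ z hz
      intro o ho
      simpa using (List.mem_filter.1 ho).2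
    exact ⟨hzX, hzY⟩
  · intro hz
    refine pv_subset_cl ctx _ ?_ z (by simp [List.mem_filter, hz])
    intro o ho
    exact pv_inRange_of_closed ctx hX o (List.mem_filter.1 ho).1


-- ---- the lectic key ----
def pvL (X Y : List Int) : Prop := ∃ i : Int, i ∈ Y ∧ i ∉ X ∧ ∀ j : Int, j < i → (j ∈ X ↔ j ∈ Y)

lemma pv_sum_range_two_pow (E : ℕ) : (∑ k ∈ Finset.range E, 2 ^ k) = 2 ^ E - 1 := by
  induction E with
  | zero => simp
  | succ E ih =>
    rw [Finset.sum_range_succ, ih]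
    have h1 : 1 ≤ 2 ^ E := Nat.one_le_two_pow
    have h2 : (2 : ℕ) ^ (E + 1) = 2 ^ E * 2 := by ring
    omega

lemma pv_sum_two_pow_lt (s : Finset ℤ) (e : ℤ → ℕ) (E : ℕ)
    (hinj : ∀ x ∈ s, ∀ y ∈ s, e x = e y → x = y) (hlt : ∀ x ∈ s, e x < E) :
    (∑ x ∈ s, 2 ^ (e x)) < 2 ^ E := by
  have himg : (∑ x ∈ s, 2 ^ (e x)) = ∑ k ∈ s.image e, 2 ^ k := (Finset.sum_image hinj).symm
  rw [himg]
  have hsub : s.image e ⊆ Finset.range E := by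
    intro k hk
    rw [Finset.mem_image] at hk
    obtain ⟨x, hx, rfl⟩ := hk
    exact Finset.mem_range.2 (hlt x hx)
  calc (∑ k ∈ s.image e, 2 ^ k) ≤ ∑ k ∈ Finset.range E, 2 ^ k :=
        Finset.sum_le_sum_of_subset hsub
    _ = 2 ^ E - 1 := pv_sum_range_two_pow E
    _ < 2 ^ E := by have : 1 ≤ (2:ℕ) ^ E := Nat.one_le_two_pow; omega


lemma pv_nkey_lt_of_L (n : Int) {X Y : List Int} (hX : X.Pairwise (· < ·))
    (hY : Y.Pairwise (· < ·)) (hXr : pvInRange n X) (hYr : pvInRange n Y)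
    (h : pvL X Y) : pvNkey n X < pvNkey n Y := by
  obtain ⟨i, hiY, hiX, hag⟩ := h
  obtain ⟨hi0, hin⟩ := hYr i hiY
  have hsum : ∀ (Z : List Int), Z.Nodup → pvNkey n Z = ∑ x ∈ Z.toFinset, pvEkey n x := by
    intro Z hZ
    rw [List.sum_toFinset _ hZ]
    rfl
  rw [hsum X (pv_nodup_of_canon hX), hsum Y (pv_nodup_of_canon hY)]
  rw [← Finset.sum_filter_add_sum_filter_not X.toFinset (fun x => x < i),
      ← Finset.sum_filter_add_sum_filter_not Y.toFinset (fun x => x < i)]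
  have hlow : X.toFinset.filter (fun x => x < i) = Y.toFinset.filter (fun x => x < i) := by
    apply Finset.ext
    intro z
    simp only [Finset.mem_filter, List.mem_toFinset]
    constructor
    · rintro ⟨h1, h2⟩; exact ⟨(hag z h2).1 h1, h2⟩
    · rintro ⟨h1, h2⟩; exact ⟨(hag z h2).2 h1, h2⟩
  rw [hlow]
  have hhighX : (∑ x ∈ X.toFinset.filter (fun x => ¬ x < i), pvEkey n x) < 2 ^ ((n - 1 - i).toNat) := by
    apply pv_sum_two_pow_lt _ (fun x => (n - 1 - x).toNat)
    · intro x hx y hy hxy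
      simp only [Finset.mem_filter, List.mem_toFinset] at hx hy
      obtain ⟨hx0, hxn⟩ := hXr x hx.1
      obtain ⟨hy0, hyn⟩ := hXr y hy.1
      omega
    · intro x hx
      simp only [Finset.mem_filter, List.mem_toFinset] at hx
      obtain ⟨hx0, hxn⟩ := hXr x hx.1
      have hxi : x ≠ i := fun h => hiX (h ▸ hx.1)
      have : i < x := by omega
      omega
  have hhighY : 2 ^ ((n - 1 - i).toNat) ≤ ∑ x ∈ Y.toFinset.filter (fun x => ¬ x < i), pvEkey n x := by
    have hmem : i ∈ Y.toFinset.filter (fun x => ¬ x < i) := by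
      simp [List.mem_toFinset, hiY]
    exact Finset.single_le_sum (f := fun x => pvEkey n x) (fun x _ => Nat.zero_le _) hmem
  omega


lemma pvL_total {X Y : List Int} (hX : X.Pairwise (· < ·)) (hY : Y.Pairwise (· < ·))
    (hne : X ≠ Y) : pvL X Y ∨ pvL Y X := by
  induction X generalizing Y with
  | nil =>
    match Y, hne with
    | [], hne => exact absurd rfl hne
    | y :: ys, _ =>
      left
      refine ⟨y, by simp, by simp, fun j hj => ?_⟩
      have hy := List.pairwise_cons.1 hY
      simp only [List.not_mem_nil, false_iff, List.mem_cons]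
      rintro (rfl | hjy)
      · exact absurd hj (lt_irrefl _)
      · exact absurd hj (not_lt.2 (hy.1 j hjy).le)
  | cons x xs ih =>
    match Y with
    | [] =>
      right
      refine ⟨x, by simp, by simp, fun j hj => ?_⟩
      have hx := List.pairwise_cons.1 hX
      simp only [List.not_mem_nil, false_iff, List.mem_cons]
      rintro (rfl | hjx)
      · exact absurd hj (lt_irrefl _)
      · exact absurd hj (not_lt.2 (hx.1 j hjx).le)
    | y :: ys =>
      have hx := List.pairwise_cons.1 hX
      have hy := List.pairwise_cons.1 hY
      rcases lt_trichotomy x y with hlt | rfl | hgt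
      · right
        refine ⟨x, by simp, ?_, fun j hj => ?_⟩
        · simp only [List.mem_cons, not_or]
          exact ⟨hlt.ne, fun hxy => absurd (hy.1 x hxy) (not_lt.2 hlt.le)⟩
        · simp only [List.mem_cons]
          constructor
          · rintro (rfl | hjy)
            · exact absurd hj (not_lt.2 hlt.le)
            · exact absurd hj (not_lt.2 (hlt.trans (hy.1 j hjy)).le)
          · rintro (rfl | hjx)
            · exact absurd hj (lt_irrefl _)
            · exact absurd hj (not_lt.2 (hx.1 j hjx).le)
      · have hne' : xs ≠ ys := fun h => hne (by rw [h])
        rcases ih hx.2 hy.2 hne' with ⟨i, hi1, hi2, hi3⟩ | ⟨i, hi1, hi2, hi3⟩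
        · left
          have hxi : x < i := hy.1 i hi1
          refine ⟨i, by simp [hi1], ?_, fun j hj => ?_⟩
          · simp only [List.mem_cons, not_or]
            exact ⟨hxi.ne', hi2⟩
          · simp only [List.mem_cons]
            exact or_congr_right (hi3 j hj)
        · right
          have hxi : x < i := hx.1 i hi1
          refine ⟨i, by simp [hi1], ?_, fun j hj => ?_⟩
          · simp only [List.mem_cons, not_or]
            exact ⟨hxi.ne', hi2⟩
          · simp only [List.mem_cons]
            exact or_congr_right (hi3 j hj)
      · left
        refine ⟨y, by simp, ?_, fun j hj => ?_⟩
        · simp only [List.mem_cons, not_or]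
          exact ⟨hgt.ne, fun hyx => absurd (hx.1 y hyx) (not_lt.2 hgt.le)⟩
        · simp only [List.mem_cons]
          constructor
          · rintro (rfl | hjx)
            · exact absurd hj (not_lt.2 hgt.le)
            · exact absurd hj (not_lt.2 (hgt.trans (hx.1 j hjx)).le)
          · rintro (rfl | hjy)
            · exact absurd hj (lt_irrefl _)
            · exact absurd hj (not_lt.2 (hy.1 j hjy).le)


lemma pvL_of_nkey_lt (n : Int) {X Y : List Int} (hX : X.Pairwise (· < ·))
    (hY : Y.Pairwise (· < ·)) (hXr : pvInRange n X) (hYr : pvInRange n Y)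
    (h : pvNkey n X < pvNkey n Y) : pvL X Y := by
  by_cases hne : X = Y
  · subst hne; exact absurd h (lt_irrefl _)
  · rcases pvL_total hX hY hne with hl | hl
    · exact hl
    · exact absurd (pv_nkey_lt_of_L n hY hX hYr hXr hl) (by omega)


lemma pv_nkey_inj (n : Int) {X Y : List Int} (hX : X.Pairwise (· < ·))
    (hY : Y.Pairwise (· < ·)) (hXr : pvInRange n X) (hYr : pvInRange n Y)
    (h : pvNkey n X = pvNkey n Y) : X = Y := by
  by_contra hne
  rcases pvL_total hX hY hne with hl | hl
  · exact absurd (pv_nkey_lt_of_L n hX hY hXr hYr hl) (by omega)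
  · exact absurd (pv_nkey_lt_of_L n hY hX hYr hXr hl) (by omega)


lemma pv_nkey_le_of_subset (n : Int) {X Y : List Int} (hX : X.Nodup) (hY : Y.Nodup)
    (h : ∀ o ∈ X, o ∈ Y) : pvNkey n X ≤ pvNkey n Y := by
  have hsum : ∀ (Z : List Int), Z.Nodup → pvNkey n Z = ∑ x ∈ Z.toFinset, pvEkey n x := by
    intro Z hZ
    rw [List.sum_toFinset _ hZ]
    rfl
  rw [hsum X hX, hsum Y hY]
  apply Finset.sum_le_sum_of_subset
  intro z hz
  rw [List.mem_toFinset] at *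
  exact h z hz


lemma pv_nkey_lt_two_pow (n : Int) {X : List Int} (hX : X.Nodup) (hXr : pvInRange n X) :
    pvNkey n X < 2 ^ n.toNat := by
  have hsum : pvNkey n X = ∑ x ∈ X.toFinset, pvEkey n x := by
    rw [List.sum_toFinset _ hX]
    rfl
  rw [hsum]
  apply pv_sum_two_pow_lt _ (fun x => (n - 1 - x).toNat)
  · intro x hx y hy hxy
    rw [List.mem_toFinset] at hx hy
    obtain ⟨hx0, hxn⟩ := hXr x hx
    obtain ⟨hy0, hyn⟩ := hXr y hy
    omega
  · intro x hx
    rw [List.mem_toFinset] at hx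
    obtain ⟨hx0, hxn⟩ := hXr x hx
    omega



-- ---- B's closed-set list ----
lemma pv_range_max' (n : Int) : PySem.List.pyRange 0 (max n 0) 1 = PySem.List.pyRange 0 n 1 := by
  by_cases h : 0 ≤ n
  · rw [max_eq_left h]
  · rw [max_eq_right (by omega), PySem.List.pyRange_one_eq_nil (le_refl 0),
      PySem.List.pyRange_one_eq_nil (by omega)]

lemma pvColExt_eq (ctx : List (List Int) × Int × Int) (a : Int) :
    pvColExt ctx a = pvExt ctx [a] := by
  unfold pvColExt pvExt
  rw [pv_range_max']
  congr 1
  funext o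
  simp

lemma pv_fold_nodup (es : List (List Int)) : ∀ S : List (List Int), S.Nodup →
    (es.foldl (fun closed E => PySem.Set.union closed (closed.map (fun X => X.filter (fun o => decide (o ∈ E))))) S).Nodup := by
  induction es with
  | nil => intro S hS; exact hS
  | cons E es ih =>
    intro S hS
    exact ih _ (PySem.Set.nodup_union _ _ hS)

lemma pv_fold_sound (ctx : List (List Int) × Int × Int) (es : List (List Int)) :
    ∀ S : List (List Int), (∀ E ∈ es, pvClosed ctx E) → (∀ X ∈ S, pvClosed ctx X) →
    ∀ X ∈ es.foldl (fun closed E => PySem.Set.union closed (closed.map (fun X => X.filter (fun o => decide (o ∈ E))))) S, pvClosed ctx X := by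
  induction es with
  | nil => intro S _ hS X hX; exact hS X hX
  | cons E es ih =>
    intro S hes hS X hX
    refine ih _ (fun E' hE' => hes E' (by simp [hE'])) ?_ X hX
    intro Y hY
    rw [PySem.Set.mem_union] at hY
    rcases hY with hY | hY
    · exact hS Y hY
    · rw [List.mem_map] at hY
      obtain ⟨Z, hZ, rfl⟩ := hY
      exact pvClosed_inter ctx (hS Z hZ) (hes E (by simp))

lemma pv_fold_complete (ctx : List (List Int) × Int × Int) (as : List Int) :
    ∀ (pre : List Int) (S : List (List Int)),
    (∀ T : List Int, (∀ a ∈ T, a ∈ pre) → pvExt ctx T ∈ S) →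
    ∀ T : List Int, (∀ a ∈ T, a ∈ pre ∨ a ∈ as) →
    pvExt ctx T ∈ (as.map (pvColExt ctx)).foldl (fun closed E => PySem.Set.union closed (closed.map (fun X => X.filter (fun o => decide (o ∈ E))))) S := by
  induction as with
  | nil =>
    intro pre S hS T hT
    exact hS T (fun a ha => (hT a ha).resolve_right (by simp))
  | cons a as ih =>
    intro pre S hS T hT
    rw [List.map_cons, List.foldl_cons]
    refine ih (pre ++ [a]) _ ?_ T ?_
    · intro T' hT'
      by_cases ha : a ∈ T'
      · have hmem : pvExt ctx T' = (pvExt ctx (T'.filter (fun b => decide (b ≠ a)))).filter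
            (fun o => decide (o ∈ pvColExt ctx a)) := by
          apply pv_canon_ext _ _ (canon_pvExt _ _) (List.Pairwise.filter _ (canon_pvExt _ _))
          intro z
          rw [mem_pvExt]
          simp only [List.mem_filter, decide_eq_true_eq]
          rw [mem_pvExt, pvColExt_eq, mem_pvExt]
          constructor
          · intro ⟨hz, hall⟩
            refine ⟨⟨hz, fun b hb => hall b (List.mem_filter.1 hb).1⟩, hz, ?_⟩
            intro b hb
            simp only [List.mem_singleton] at hb
            exact hb ▸ hall a ha
          · intro ⟨⟨hz, hall⟩, _, hza⟩
            refine ⟨hz, fun b hb => ?_⟩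
            by_cases hba : b = a
            · exact hba ▸ hza a (by simp)
            · exact hall b (by simp [List.mem_filter, hb, hba])
        rw [hmem, PySem.Set.mem_union]
        right
        rw [List.mem_map]
        refine ⟨pvExt ctx (T'.filter (fun b => decide (b ≠ a))), hS _ ?_, rfl⟩
        intro b hb
        have := List.mem_filter.1 hb
        have h := hT' b this.1
        rw [List.mem_append, List.mem_singleton] at h
        rcases h with h | h
        · exact h
        · exact absurd h (by simpa using this.2)
      · rw [PySem.Set.mem_union]
        left
        refine hS T' (fun b hb => ?_)
        have h := hT' b hb
        rw [List.mem_append, List.mem_singleton] at h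
        rcases h with h | h
        · exact h
        · exact absurd (h ▸ hb) ha
    · intro b hb
      rcases hT b hb with h | h
      · left; simp [h]
      · rcases List.mem_cons.1 h with h | h
        · left; simp [h]
        · right; exact h

lemma pv_nodup_closedL (ctx : List (List Int) × Int × Int) : (pvClosedL ctx).Nodup := by
  unfold pvClosedL
  apply pv_fold_nodup
  exact PySem.Set.nodup_ofList _


lemma pv_mem_closedL (ctx : List (List Int) × Int × Int) (X : List Int) :
    X ∈ pvClosedL ctx ↔ pvClosed ctx X := by
  unfold pvClosedL
  have hof : PySem.Set.ofList [PySem.List.pyRange 0 (max ctx.2.1 0) 1]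
      = [PySem.List.pyRange 0 (max ctx.2.1 0) 1] := by
    apply PySem.Set.ofList_eq_self_of_nodup
    simp
  rw [hof, pv_range_max']
  constructor
  · intro hX
    refine pv_fold_sound ctx _ _ ?_ ?_ X hX
    · intro E hE
      rw [List.mem_map] at hE
      obtain ⟨a, ha, rfl⟩ := hE
      rw [PySem.List.mem_pyRange_one] at ha
      rw [pvColExt_eq]
      apply pvClosed_ext
      intro b hb
      simp only [List.mem_singleton] at hb
      subst hb
      omega
    · intro Y hY
      simp only [List.mem_singleton] at hY
      subst hY
      exact pvClosed_full ctx
  · intro hX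
    have hXT : X = pvExt ctx (pvItt ctx X) := hX.symm
    rw [hXT]
    apply pv_fold_complete ctx _ []
    · intro T hT
      have hTnil : T = [] := List.eq_nil_iff_forall_not_mem.2 (fun a ha => by simpa using hT a ha)
      subst hTnil
      have : pvExt ctx [] = pvFull ctx := by
        unfold pvExt pvFull
        simp
      simp [this, pvFull]
    · intro a ha
      right
      rw [mem_pvItt] at ha
      rw [PySem.List.mem_pyRange_one]
      omega


-- ---- Ganter: Next returns the lectic-least closed set above A ----
def pvGood (ctx : List (List Int) × Int × Int) (A : List Int) (i : Int) : Prop :=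
  i ∉ A ∧ ∀ j ∈ pyOplus A i ctx, j < i → j ∈ A

lemma pv_discard_fold (g : Int) (l : List Int) : ∀ (B : List Int) (x : Int),
    x ∈ l.foldl (fun B y => if y > g then PySem.Set.discard B y else B) B ↔
      x ∈ B ∧ ¬(x > g ∧ x ∈ l) := by
  induction l with
  | nil => intro B x; simp
  | cons y l ih =>
    intro B x
    rw [List.foldl_cons]
    by_cases hy : y > g
    · rw [if_pos hy, ih]
      rw [PySem.Set.mem_discard]
      constructor
      · rintro ⟨⟨hxB, hxy⟩, hnot⟩
        refine ⟨hxB, fun ⟨hxg, hxl⟩ => ?_⟩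
        rcases List.mem_cons.1 hxl with h | h
        · exact hxy h
        · exact hnot ⟨hxg, h⟩
      · rintro ⟨hxB, hnot⟩
        by_cases hxg : x > g
        · exact ⟨⟨hxB, fun h => hnot ⟨hxg, by simp [h]⟩⟩,
            fun ⟨_, hxl⟩ => hnot ⟨hxg, by simp [hxl]⟩⟩
        · exact ⟨⟨hxB, fun h => hxg (h ▸ hy)⟩, fun ⟨h, _⟩ => hxg h⟩
    · rw [if_neg hy, ih]
      constructor
      · rintro ⟨hxB, hnot⟩
        refine ⟨hxB, fun ⟨hxg, hxl⟩ => ?_⟩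
        rcases List.mem_cons.1 hxl with h | h
        · exact hy (h ▸ hxg)
        · exact hnot ⟨hxg, h⟩
      · rintro ⟨hxB, hnot⟩
        exact ⟨hxB, fun ⟨hxg, hxl⟩ => hnot ⟨hxg, by simp [hxl]⟩⟩

lemma pyOplus_eq (A : List Int) (g : Int) (ctx : List (List Int) × Int × Int)
    (hg : g ∉ A) :
    pyOplus A g ctx = pvCl ctx (A.filter (fun x => decide (x ≤ g)) ++ [g]) := by
  unfold pyOplus
  rw [pyExtent_eq, pyIntent_eq]
  unfold pvCl
  congr 1
  apply pvItt_congr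
  intro x
  have hP : ∀ z : Int, z ∈ A.foldl (fun B y => if y > g then PySem.Set.discard B y else B) A ↔
      z ∈ A ∧ z ≤ g := by
    intro z
    rw [pv_discard_fold]
    constructor
    · rintro ⟨hz, hnot⟩
      refine ⟨hz, ?_⟩
      by_contra hc
      exact hnot ⟨by omega, hz⟩
    · rintro ⟨hz, hle⟩
      exact ⟨hz, fun ⟨hgt, _⟩ => by omega⟩
  have hgP : g ∉ A.foldl (fun B y => if y > g then PySem.Set.discard B y else B) A := by
    rw [hP]
    exact fun h => hg h.1
  rw [PySem.Set.add_of_not_mem hgP, PySem.Set.mem_ofList]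
  simp only [List.mem_append, List.mem_singleton, List.mem_filter, decide_eq_true_eq, hP]

lemma pv_flag_foldl2 (S : List Int) (q : Int → Bool) (b : Bool) :
    S.foldl (fun fin j => if q j then false else fin) b = (b && S.all (fun j => ! q j)) := by
  induction S generalizing b with
  | nil => simp
  | cons j S ih =>
    rw [List.foldl_cons]
    by_cases h : q j = true
    · rw [if_pos h, ih, List.all_cons, h]
      simp
    · rw [if_neg h, ih, List.all_cons]
      simp [h]

lemma pv_fin_iff (ctx : List (List Int) × Int × Int) (A B : List Int) (i : Int) :
    (B.foldl (fun fin j => if j < i ∧ j ∉ A then false else fin) true = true) ↔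
      (∀ j ∈ B, j < i → j ∈ A) := by
  rw [show (fun fin j => if j < i ∧ j ∉ A then false else fin)
      = (fun fin j => if (fun j => decide (j < i ∧ j ∉ A)) j then false else fin) by
    funext fin j; by_cases h : j < i ∧ j ∉ A <;> simp [h]]
  rw [pv_flag_foldl2]
  simp only [Bool.true_and, List.all_eq_true, Bool.not_eq_eq_eq_not, Bool.not_true,
    decide_eq_false_iff_not]
  constructor
  · intro h j hj hji
    by_contra hc
    exact h j hj ⟨hji, hc⟩
  · intro h j hj hc
    exact hc.2 (h j hj hc.1)

lemma pv_good_L (ctx : List (List Int) × Int × Int) {A : List Int} (i : Int)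
    (hA : pvClosed ctx A) (hi0 : 0 ≤ i) (hin : i < ctx.2.1) (hgood : pvGood ctx A i) :
    pvClosed ctx (pyOplus A i ctx) ∧ i ∈ pyOplus A i ctx ∧
      (∀ j : Int, j < i → (j ∈ A ↔ j ∈ pyOplus A i ctx)) := by
  rw [pyOplus_eq A i ctx hgood.1]
  have hbr : pvInRange ctx.2.1 (A.filter (fun x => decide (x ≤ i)) ++ [i]) := by
    intro o ho
    rw [List.mem_append, List.mem_singleton] at ho
    rcases ho with ho | rfl
    · exact pv_inRange_of_closed ctx hA o (List.mem_filter.1 ho).1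
    · exact ⟨hi0, hin⟩
  refine ⟨pvClosed_cl ctx _, ?_, ?_⟩
  · exact pv_subset_cl ctx _ hbr i (by simp)
  · intro j hj
    constructor
    · intro hjA
      refine pv_subset_cl ctx _ hbr j ?_
      rw [List.mem_append, List.mem_filter]
      left
      exact ⟨hjA, by simp; omega⟩
    · intro hjO
      have := hgood.2 j (by rw [pyOplus_eq A i ctx hgood.1]; exact hjO) hj
      exact this

lemma pv_Lwit_good (ctx : List (List Int) × Int × Int) {A C : List Int} {i : Int}
    (hA : pvClosed ctx A) (hC : pvClosed ctx C) (hiC : i ∈ C) (hiA : i ∉ A)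
    (hag : ∀ j : Int, j < i → (j ∈ A ↔ j ∈ C)) :
    pvGood ctx A i ∧ ∀ x ∈ pyOplus A i ctx, x ∈ C := by
  have hsub : ∀ x ∈ pyOplus A i ctx, x ∈ C := by
    rw [pyOplus_eq A i ctx hiA]
    intro x hx
    rw [← hC]
    refine pvCl_mono ctx (S := A.filter (fun x => decide (x ≤ i)) ++ [i]) ?_ x hx
    intro z hz
    rw [List.mem_append, List.mem_singleton] at hz
    rcases hz with hz | rfl
    · have hz' := List.mem_filter.1 hz
      have hzle : z ≤ i := by simpa using hz'.2
      have hzne : z ≠ i := fun h => hiA (h ▸ hz'.1)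
      exact (hag z (by omega)).1 hz'.1
    · exact hiC
  refine ⟨⟨hiA, fun j hj hji => ?_⟩, hsub⟩
  exact (hag j hji).2 (hsub j hj)

lemma pv_exists_min (l : List (List Int)) (f : List Int → ℕ) (hne : l ≠ []) :
    ∃ y ∈ l, ∀ z ∈ l, f y ≤ f z := by
  induction l with
  | nil => exact absurd rfl hne
  | cons x l ih =>
    rcases eq_or_ne l [] with rfl | hl
    · exact ⟨x, by simp, by simp⟩
    · obtain ⟨y, hy, hmin⟩ := ih hl
      rcases le_total (f x) (f y) with h | h
      · refine ⟨x, by simp, ?_⟩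
        intro z hz
        rcases List.mem_cons.1 hz with rfl | hz
        · exact le_refl _
        · exact h.trans (hmin z hz)
      · refine ⟨y, by simp [hy], ?_⟩
        intro z hz
        rcases List.mem_cons.1 hz with rfl | hz
        · exact h
        · exact hmin z hz

lemma pv_go_spec (ctx : List (List Int) × Int × Int) (A : List Int) (g : Int)
    (hgood : pvGood ctx A g)
    (hnogood : ∀ j : Int, g < j → j < ctx.2.1 → ¬ pvGood ctx A j) :
    ∀ l : List Int, l.Pairwise (· > ·) → g ∈ l → (∀ j ∈ l, j < ctx.2.1) →
      pyNextGo A ctx l = some (pyOplus A g ctx) := by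
  intro l
  induction l with
  | nil => intro _ hg _; exact absurd hg (List.not_mem_nil)
  | cons i rest ih =>
    intro hpw hg hbd
    have hpw' := List.pairwise_cons.1 hpw
    rcases eq_or_ne i g with rfl | hig
    · rw [pyNextGo, if_neg hgood.1, if_pos ((pv_fin_iff ctx A _ i).2 hgood.2)]
    · have hgrest : g ∈ rest := by
        rcases List.mem_cons.1 hg with h | h
        · exact absurd h.symm hig
        · exact h
      have hgi : g < i := hpw'.1 g hgrest
      have hni := hnogood i hgi (hbd i (by simp))
      rw [pyNextGo]
      by_cases hiA : i ∈ A
      · rw [if_pos hiA]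
        exact ih hpw'.2 hgrest (fun j hj => hbd j (by simp [hj]))
      · rw [if_neg hiA]
        have hfin : ¬ (∀ j ∈ pyOplus A i ctx, j < i → j ∈ A) := by
          intro hc
          exact hni ⟨hiA, hc⟩
        rw [if_neg (by rw [pv_fin_iff ctx A (pyOplus A i ctx) i]; exact hfin)]
        exact ih hpw'.2 hgrest (fun j hj => hbd j (by simp [hj]))
lemma pv_next_spec (ctx : List (List Int) × Int × Int) {A : List Int}
    (hA : pvClosed ctx A) (hlen : (A.length : Int) < ctx.2.1) :
    ∃ B, pyNext A ctx = some B ∧ pvClosed ctx B ∧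
      pvNkey ctx.2.1 A < pvNkey ctx.2.1 B ∧
      ∀ C, pvClosed ctx C → pvNkey ctx.2.1 A < pvNkey ctx.2.1 C →
        pvNkey ctx.2.1 B ≤ pvNkey ctx.2.1 C := by
  set n := ctx.2.1 with hn
  have hApw := pv_canon_of_closed ctx hA
  have hAr := pv_inRange_of_closed ctx hA
  have hAnd := pv_nodup_of_canon hApw
  -- A is a proper subset of the full extent
  have hfull_closed := pvClosed_full ctx
  have hfull_pw := pv_canon_of_closed ctx hfull_closed
  have hfull_r := pv_inRange_of_closed ctx hfull_closed
  have hAfull_sub : ∀ o ∈ A, o ∈ pvFull ctx := by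
    intro o ho
    unfold pvFull
    rw [PySem.List.mem_pyRange_one]
    have := hAr o ho
    omega
  have hlenfull : (pvFull ctx).length = n.toNat := by
    unfold pvFull
    rw [PySem.List.length_pyRange_one]
    omega
  have hAnefull : A ≠ pvFull ctx := by
    intro h
    rw [h] at hlen
    omega
  have hkey_lt_full : pvNkey n A < pvNkey n (pvFull ctx) := by
    have hle := pv_nkey_le_of_subset n hAnd (pv_nodup_of_canon hfull_pw) hAfull_sub
    rcases lt_or_eq_of_le hle with h | h
    · exact h
    · exact absurd (pv_nkey_inj n hApw hfull_pw hAr hfull_r h) hAnefull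
  -- C₀ : the closed set with least key above A
  have hfull_mem : pvFull ctx ∈ (pvClosedL ctx).filter (fun C => decide (pvNkey n A < pvNkey n C)) := by
    rw [List.mem_filter]
    exact ⟨(pv_mem_closedL ctx _).2 hfull_closed, by simpa using hkey_lt_full⟩
  obtain ⟨C₀, hC₀mem, hC₀min⟩ := pv_exists_min _ (pvNkey n)
    (List.ne_nil_of_mem hfull_mem)
  rw [List.mem_filter] at hC₀mem
  have hC₀closed : pvClosed ctx C₀ := (pv_mem_closedL ctx _).1 hC₀mem.1
  have hC₀key : pvNkey n A < pvNkey n C₀ := by simpa using hC₀mem.2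
  have hC₀min' : ∀ C, pvClosed ctx C → pvNkey n A < pvNkey n C → pvNkey n C₀ ≤ pvNkey n C := by
    intro C hC hkC
    refine hC₀min C ?_
    rw [List.mem_filter]
    exact ⟨(pv_mem_closedL ctx _).2 hC, by simpa using hkC⟩
  have hC₀pw := pv_canon_of_closed ctx hC₀closed
  have hC₀r := pv_inRange_of_closed ctx hC₀closed
  -- the lectic witness of A < C₀
  obtain ⟨i, hiC₀, hiA, hag⟩ := pvL_of_nkey_lt n hApw hC₀pw hAr hC₀r hC₀key
  obtain ⟨hi0, hin⟩ := hC₀r i hiC₀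
  obtain ⟨hgood, hOsub⟩ := pv_Lwit_good ctx hA hC₀closed hiC₀ hiA hag
  obtain ⟨hOclosed, hiO, hagO⟩ := pv_good_L ctx i hA hi0 hin hgood
  have hOpw := pv_canon_of_closed ctx hOclosed
  have hOr := pv_inRange_of_closed ctx hOclosed
  -- pyOplus A i = C₀
  have hkO : pvNkey n A < pvNkey n (pyOplus A i ctx) :=
    pv_nkey_lt_of_L n hApw hOpw hAr hOr ⟨i, hiO, hiA, fun j hj => hagO j hj⟩
  have hOC₀ : pyOplus A i ctx = C₀ := by
    have h1 : pvNkey n (pyOplus A i ctx) ≤ pvNkey n C₀ :=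
      pv_nkey_le_of_subset n (pv_nodup_of_canon hOpw) (pv_nodup_of_canon hC₀pw) hOsub
    have h2 : pvNkey n C₀ ≤ pvNkey n (pyOplus A i ctx) := hC₀min' _ hOclosed hkO
    exact pv_nkey_inj n hOpw hC₀pw hOr hC₀r (by omega)
  -- no good index above i
  have hnogood : ∀ j : Int, i < j → j < n → ¬ pvGood ctx A j := by
    intro j hij hjn hgj
    have hj0 : 0 ≤ j := by omega
    obtain ⟨hOjclosed, hjOj, hagOj⟩ := pv_good_L ctx j hA hj0 hjn hgj
    have hOjpw := pv_canon_of_closed ctx hOjclosed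
    have hOjr := pv_inRange_of_closed ctx hOjclosed
    have hkOj : pvNkey n A < pvNkey n (pyOplus A j ctx) :=
      pv_nkey_lt_of_L n hApw hOjpw hAr hOjr ⟨j, hjOj, hgj.1, fun j' hj' => hagOj j' hj'⟩
    have hminOj : pvNkey n C₀ ≤ pvNkey n (pyOplus A j ctx) := hC₀min' _ hOjclosed hkOj
    have hLOjC₀ : pvL (pyOplus A j ctx) C₀ := by
      refine ⟨i, hiC₀, ?_, ?_⟩
      · intro hiOj
        exact hiA ((hagOj i hij).2 hiOj)
      · intro j' hj'
        rw [← hagOj j' (by omega), ← hag j' hj']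
    have := pv_nkey_lt_of_L n hOjpw hC₀pw hOjr hC₀r hLOjC₀
    omega
  -- the scan over reversed(range(n)) returns pyOplus A i
  have hgo : pyNext A ctx = some (pyOplus A i ctx) := by
    unfold pyNext
    refine pv_go_spec ctx A i hgood hnogood _ ?_ ?_ ?_
    · rw [List.pairwise_reverse]
      exact PySem.List.pairwise_lt_pyRange_one _ _
    · rw [List.mem_reverse, PySem.List.mem_pyRange_one]
      exact ⟨hi0, hin⟩
    · intro j hj
      rw [List.mem_reverse, PySem.List.mem_pyRange_one] at hj
      exact hj.2
  refine ⟨pyOplus A i ctx, hgo, hOclosed, hkO, ?_⟩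
  intro C hC hkC
  rw [hOC₀]
  exact hC₀min' C hC hkC


-- ---- the chain ----
lemma pv_loop_eq_chain (ctx : List (List Int) × Int × Int) (fuel : Nat) (A : List Int)
    (acc : List (List (List Int))) :
    pyNCLoop ctx fuel A acc = acc ++ (pvChain ctx fuel A).map (fun X => [X, pyIntent X ctx]) := by
  induction fuel generalizing A acc with
  | zero => simp [pyNCLoop, pvChain]
  | succ fuel ih =>
    rw [pyNCLoop, pvChain]
    by_cases hc : (A.length : Int) < ctx.2.1
    · rw [if_pos hc, if_pos hc]
      cases hnext : pyNext A ctx with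
      | none => simp
      | some A' =>
        simp only []
        rw [ih]
        simp
    · rw [if_neg hc, if_neg hc]
      simp


lemma pv_mem_chain (ctx : List (List Int) × Int × Int) (fuel : Nat) (A : List Int)
    (hA : pvClosed ctx A) (hfuel : 2 ^ ctx.2.1.toNat < fuel + pvNkey ctx.2.1 A) :
    ∀ X, X ∈ pvChain ctx fuel A ↔ (pvClosed ctx X ∧ pvNkey ctx.2.1 A ≤ pvNkey ctx.2.1 X) := by
  induction fuel generalizing A with
  | zero =>
    exfalso
    have := pv_nkey_lt_two_pow ctx.2.1 (pv_nodup_of_canon (pv_canon_of_closed ctx hA))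
      (pv_inRange_of_closed ctx hA)
    omega
  | succ fuel ih =>
    intro X
    rw [pvChain]
    by_cases hc : (A.length : Int) < ctx.2.1
    · rw [if_pos hc]
      obtain ⟨B, hnext, hBclosed, hkAB, hmin⟩ := pv_next_spec ctx hA hc
      rw [hnext]
      have hfuelB : 2 ^ ctx.2.1.toNat < fuel + pvNkey ctx.2.1 B := by omega
      have ihB := ih B hBclosed hfuelB
      simp only [List.mem_cons]
      constructor
      · rintro (rfl | hX)
        · exact ⟨hA, le_refl _⟩
        · obtain ⟨h1, h2⟩ := (ihB X).1 hX
          exact ⟨h1, by omega⟩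
      · rintro ⟨hXc, hle⟩
        rcases eq_or_lt_of_le hle with heq | hlt
        · left
          exact pv_nkey_inj ctx.2.1 (pv_canon_of_closed ctx hXc) (pv_canon_of_closed ctx hA)
            (pv_inRange_of_closed ctx hXc) (pv_inRange_of_closed ctx hA) heq.symm
        · right
          exact (ihB X).2 ⟨hXc, hmin X hXc hlt⟩
    · rw [if_neg hc]
      -- A is the full extent
      have hAfull : A = pvFull ctx := by
        apply pv_canon_ext _ _ (pv_canon_of_closed ctx hA) (pv_canon_of_closed ctx (pvClosed_full ctx))
        have hsub : A.toFinset ⊆ (pvFull ctx).toFinset := by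
          intro o ho
          rw [List.mem_toFinset] at *
          unfold pvFull
          rw [PySem.List.mem_pyRange_one]
          have := pv_inRange_of_closed ctx hA o ho
          omega
        have hcard : (pvFull ctx).toFinset.card ≤ A.toFinset.card := by
          rw [List.toFinset_card_of_nodup (pv_nodup_of_canon (pv_canon_of_closed ctx hA)),
            List.toFinset_card_of_nodup (pv_nodup_of_canon (pv_canon_of_closed ctx (pvClosed_full ctx)))]
          unfold pvFull
          rw [PySem.List.length_pyRange_one]
          omega
        have := Finset.eq_of_subset_of_card_le hsub hcard
        intro z
        rw [← List.mem_toFinset, ← List.mem_toFinset (l := pvFull ctx), this]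
      simp only [List.mem_cons, List.not_mem_nil, or_false]
      constructor
      · rintro rfl
        exact ⟨hA, le_refl _⟩
      · rintro ⟨hXc, hle⟩
        have hXsub : ∀ o ∈ X, o ∈ A := by
          intro o ho
          rw [hAfull]
          unfold pvFull
          rw [PySem.List.mem_pyRange_one]
          have := pv_inRange_of_closed ctx hXc o ho
          omega
        have hge := pv_nkey_le_of_subset ctx.2.1 (pv_nodup_of_canon (pv_canon_of_closed ctx hXc))
          (pv_nodup_of_canon (pv_canon_of_closed ctx hA)) hXsub
        exact (pv_nkey_inj ctx.2.1 (pv_canon_of_closed ctx hXc) (pv_canon_of_closed ctx hA)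
          (pv_inRange_of_closed ctx hXc) (pv_inRange_of_closed ctx hA) (by omega))


lemma pv_chain_pairwise (ctx : List (List Int) × Int × Int) (fuel : Nat) (A : List Int)
    (hA : pvClosed ctx A) (hfuel : 2 ^ ctx.2.1.toNat < fuel + pvNkey ctx.2.1 A) :
    (pvChain ctx fuel A).Pairwise (fun X Y => pvNkey ctx.2.1 X < pvNkey ctx.2.1 Y) := by
  induction fuel generalizing A with
  | zero => rw [pvChain]; exact List.Pairwise.nil
  | succ fuel ih =>
    rw [pvChain]
    by_cases hc : (A.length : Int) < ctx.2.1
    · rw [if_pos hc]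
      obtain ⟨B, hnext, hBclosed, hkAB, hmin⟩ := pv_next_spec ctx hA hc
      rw [hnext]
      have hfuelB : 2 ^ ctx.2.1.toNat < fuel + pvNkey ctx.2.1 B := by omega
      refine List.pairwise_cons.2 ⟨?_, ih B hBclosed hfuelB⟩
      intro Y hY
      have := (pv_mem_chain ctx fuel B hBclosed hfuelB Y).1 hY
      omega
    · rw [if_neg hc]
      exact List.pairwise_singleton _ _


-- ---- the boolean-tuple key realises the lectic order ----
lemma pv_lex_append (p l1 l2 : List Bool) (h : List.Lex (· < ·) l1 l2) :
    List.Lex (· < ·) (p ++ l1) (p ++ l2) := by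
  induction p with
  | nil => exact h
  | cons x p ih => exact List.Lex.cons ih

lemma pv_keyT_lt (n : Int) {X Y : List Int} (hX : X.Pairwise (· < ·))
    (hY : Y.Pairwise (· < ·)) (hXr : pvInRange n X) (hYr : pvInRange n Y)
    (h : pvNkey n X < pvNkey n Y) : List.Lex (· < ·) (pvKeyT n X) (pvKeyT n Y) := by
  obtain ⟨i, hiY, hiX, hag⟩ := pvL_of_nkey_lt n hX hY hXr hYr h
  obtain ⟨hi0, hin⟩ := hYr i hiY
  unfold pvKeyT
  rw [pv_range_max', PySem.List.pyRange_one_append 0 i n hi0 (by omega),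
    PySem.List.pyRange_one_cons (by omega : i < n)]
  rw [List.map_append, List.map_append, List.map_cons, List.map_cons]
  have hlow : (PySem.List.pyRange 0 i 1).map (fun o => decide (o ∈ X))
      = (PySem.List.pyRange 0 i 1).map (fun o => decide (o ∈ Y)) := by
    apply List.map_congr_left
    intro j hj
    rw [PySem.List.mem_pyRange_one] at hj
    exact decide_eq_decide.2 (hag j hj.2)
  rw [hlow]
  apply pv_lex_append
  have hx : decide (i ∈ X) = false := by simpa using hiX
  have hy : decide (i ∈ Y) = true := by simpa using hiY
  rw [hx, hy]
  exact List.Lex.rel (by decide)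

-- the port's sorted call elaborates with core's List LT instance; it computes the same
-- comparisons as Mathlib's LinearOrder instance on List Bool
lemma pv_sorted_bridge (l : List (List Int)) (key : List Int → List Bool) :
    @PySem.List.sorted (List Int) (List Bool) List.instLT (fun a b => a.decidableLT b) l key false
      = @PySem.List.sorted (List Int) (List Bool) List.instLinearOrder.toLT
          LinearOrder.toDecidableLT l key false := by
  rw [@PySem.List.sorted_eq_foldl_insertBy (List Int) (List Bool) List.instLT
        (fun a b => a.decidableLT b) l key,
      @PySem.List.sorted_eq_foldl_insertBy (List Int) (List Bool) List.instLinearOrder.toLT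
        LinearOrder.toDecidableLT l key]
  congr 1
  funext acc x
  congr 1
  funext a b
  exact decide_eq_decide.2 (List.lt_iff_lex_lt (key a) (key b))

-- ---- assembly ----

lemma pv_main (ctx : List (List Int) × Int × Int) : NextClosure ctx = NextClosure_alt ctx := by
  -- A's side: the loop from the closure of ∅
  have hA0 : pyExtent (pyIntent [] ctx) ctx = pvCl ctx [] := by
    rw [pyIntent_eq, pyExtent_eq]
    rfl
  have hA0closed : pvClosed ctx (pvCl ctx []) := pvClosed_cl ctx []
  have hfuel : 2 ^ ctx.2.1.toNat < (2 ^ ctx.2.1.toNat + 1) + pvNkey ctx.2.1 (pvCl ctx []) := by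
    omega
  have hAside : NextClosure ctx
      = (pvChain ctx (2 ^ ctx.2.1.toNat + 1) (pvCl ctx [])).map (fun X => [X, pyIntent X ctx]) := by
    unfold NextClosure
    rw [hA0, pv_loop_eq_chain]
    simp
  -- B's side
  have hBside : NextClosure_alt ctx
      = (@PySem.List.sorted (List Int) (List Bool) List.instLT (fun a b => a.decidableLT b)
          (pvClosedL ctx) (pvKeyT ctx.2.1) false).map (fun X => [X, pyIntent X ctx]) := rfl
  -- the chain is exactly the closed sets sorted by lectic key
  set CH := pvChain ctx (2 ^ ctx.2.1.toNat + 1) (pvCl ctx []) with hCH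
  have hmem := pv_mem_chain ctx _ _ hA0closed hfuel
  have hpw := pv_chain_pairwise ctx _ _ hA0closed hfuel
  have hA0least : ∀ X, pvClosed ctx X → pvNkey ctx.2.1 (pvCl ctx []) ≤ pvNkey ctx.2.1 X := by
    intro X hX
    apply pv_nkey_le_of_subset _ (pv_nodup_of_canon (pv_canon_of_closed ctx hA0closed))
      (pv_nodup_of_canon (pv_canon_of_closed ctx hX))
    intro o ho
    have hsub : ∀ o' ∈ pvCl ctx ([] : List Int), o' ∈ pvCl ctx X :=
      pvCl_mono ctx (by simp)
    rw [← hX]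
    exact hsub o ho
  have hnodupCH : CH.Nodup := by
    refine hpw.imp ?_
    intro X Y h heq
    rw [heq] at h
    omega
  have hperm : CH.Perm (pvClosedL ctx) := by
    rw [List.perm_ext_iff_of_nodup hnodupCH (pv_nodup_closedL ctx)]
    intro X
    rw [hmem X, pv_mem_closedL]
    constructor
    · exact fun h => h.1
    · exact fun h => ⟨h, hA0least X h⟩
  have hpwB : CH.Pairwise (fun a b => pvKeyT ctx.2.1 a < pvKeyT ctx.2.1 b) := by
    refine List.Pairwise.imp_of_mem ?_ hpw
    intro X Y hXm hYm h
    have hXc := ((hmem X).1 hXm).1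
    have hYc := ((hmem Y).1 hYm).1
    exact pv_keyT_lt ctx.2.1 (pv_canon_of_closed ctx hXc) (pv_canon_of_closed ctx hYc)
      (pv_inRange_of_closed ctx hXc) (pv_inRange_of_closed ctx hYc) h
  have hsorted : @PySem.List.sorted (List Int) (List Bool) List.instLinearOrder.toLT
      LinearOrder.toDecidableLT (pvClosedL ctx) (pvKeyT ctx.2.1) false = CH :=
    PySem.List.sorted_eq_of_perm_of_pairwise_lt _ _ _ hperm hpwB
  rw [hAside, hBside, pv_sorted_bridge, hsorted]

-- ===== VERDICT (by name: the statement is the Claim_ definition above) =====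
theorem NextClosure_spec : Claim_equal_NextClosure := by
  intro ctx _
  unfold Spec_NextClosure
  exact pv_main ctx
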